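-- pv_equiv track=rewrite | github.com/hallucious/Nexa | src/server/fastapi_binding.py | _collect_share_ids_from_form
-- ===== SOURCE A (Python) =====
-- from typing import Any, Mapping, Optional
--
-- def _collect_share_ids_from_form(form: Mapping[str, str]) -> list[str]:
--     share_ids: list[str] = []
--     share_ids_csv = str(form.get("share_ids_csv") or "").strip()
--     if share_ids_csv:
--         for raw_value in share_ids_csv.split(","):
--             share_id = raw_value.strip()
--             if share_id and share_id not in share_ids:
--                 share_ids.append(share_id)
--     share_id = str(form.get("share_id") or "").strip()
--     if share_id and share_id not in share_ids:
--         share_ids.append(share_id)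
--     return share_ids
-- ===== SOURCE B (Python) =====
-- def _nub(xs):
--     # removal-based recursive dedup: keep the head, delete all its later
--     # duplicates from the rest, recurse on what remains
--     if not xs:
--         return []
--     head = xs[0]
--     return [head] + _nub([x for x in xs[1:] if x != head])
--
-- def _collect_share_ids_from_form(form):
--     parts = str(form.get("share_ids_csv") or "").strip().split(",")
--     parts.append(str(form.get("share_id") or ""))
--     return _nub([p for p in (q.strip() for q in parts) if p])
-- ===== Notes on version B (the rewrite author's own statement) =====
-- stated objective: alternative
-- what changed: A's two staged guarded blocks with an accumulator and membership-checking appends are replaced by building one candidate list (CSV pieces plus the single id) and deduplicating it with a removal-based recursion that keeps each head and filters its duplicates out of the tail before recursing; no accumulator or membership test against the output is maintained.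
import Mathlib
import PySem

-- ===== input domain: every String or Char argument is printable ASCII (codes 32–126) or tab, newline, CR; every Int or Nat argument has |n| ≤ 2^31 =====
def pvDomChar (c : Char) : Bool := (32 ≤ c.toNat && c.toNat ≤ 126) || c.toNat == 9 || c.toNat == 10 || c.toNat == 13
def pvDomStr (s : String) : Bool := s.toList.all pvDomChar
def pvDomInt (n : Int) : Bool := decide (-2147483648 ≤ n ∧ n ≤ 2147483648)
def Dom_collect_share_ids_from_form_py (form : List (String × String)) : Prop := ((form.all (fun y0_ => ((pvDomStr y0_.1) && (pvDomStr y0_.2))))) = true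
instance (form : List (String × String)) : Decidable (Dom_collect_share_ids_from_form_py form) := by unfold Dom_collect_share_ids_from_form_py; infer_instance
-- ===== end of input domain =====

-- B replaces A's two accumulator blocks with guarded appends by one candidate list
-- deduplicated by a removal-based recursion (keep head, filter its duplicates from the tail).

-- ===== PORT A =====
def collect_share_ids_from_form_py (form : List (String × String)) : List String :=
  let share_ids_csv := PySem.Str.strip ((form.lookup "share_ids_csv").getD "")
  let share_ids : List String :=
    if share_ids_csv ≠ "" then
      -- sep "," is never empty, so split? is always some; getD [] is unreachable
      ((PySem.Str.split? share_ids_csv ",").getD []).foldl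
        (fun share_ids raw_value =>
          let share_id := PySem.Str.strip raw_value
          if share_id ≠ "" ∧ share_id ∉ share_ids then share_ids ++ [share_id] else share_ids)
        []
    else []
  let share_id := PySem.Str.strip ((form.lookup "share_id").getD "")
  if share_id ≠ "" ∧ share_id ∉ share_ids then share_ids ++ [share_id] else share_ids

-- ===== PORT B =====
-- B's helper _nub: keep the head, remove its duplicates from the tail, recurse
def pvNub (xs : List String) : List String :=
  match xs with
  | [] => []
  | h :: t => h :: pvNub (t.filter (fun x => x ≠ h))
termination_by xs.length
decreasing_by
  simp only [List.length_unattach, List.length_cons]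
  exact Nat.lt_succ_of_le (le_trans (List.length_filter_le _ _) (by simp))

def collect_share_ids_from_form_py_alt (form : List (String × String)) : List String :=
  let parts :=
    (PySem.Str.split? (PySem.Str.strip ((form.lookup "share_ids_csv").getD "")) ",").getD []
      ++ [(form.lookup "share_id").getD ""]
  pvNub ((parts.map PySem.Str.strip).filter (fun p => p ≠ ""))

-- ===== PRECONDITION & SPEC =====
def Spec_collect_share_ids_from_form_py (form : List (String × String)) (out : List String) : Prop := out = collect_share_ids_from_form_py_alt form
instance (form : List (String × String)) (out : List String) : Decidable (Spec_collect_share_ids_from_form_py form out) := by unfold Spec_collect_share_ids_from_form_py; infer_instance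

-- ===== CLAIM =====
def Claim_equal_collect_share_ids_from_form_py : Prop := ∀ (form : List (String × String)), Dom_collect_share_ids_from_form_py form → Spec_collect_share_ids_from_form_py form (collect_share_ids_from_form_py form)

-- ===== LEMMAS AND PROOFS =====

-- A's loop step on an already-stripped value
def pvStep (acc : List String) (s : String) : List String :=
  if s ≠ "" ∧ s ∉ acc then acc ++ [s] else acc

-- A's guarded dedup-append fold equals filtering out "" and then the Set.add fold
lemma pvFoldStep_eq (zs : List String) (acc : List String) :
    zs.foldl pvStep acc = (zs.filter (fun p => p ≠ "")).foldl PySem.Set.add acc := by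
  induction zs generalizing acc with
  | nil => rfl
  | cons z zs ih =>
    by_cases hz : z = ""
    · subst hz; simp [pvStep, ih]
    · by_cases hm : z ∈ acc
      · simp [pvStep, hz, hm, PySem.Set.add, ih]
      · simp [pvStep, hz, hm, PySem.Set.add, ih]

-- the accumulator fold of Set.add equals the removal-based nub of the not-yet-seen elements
lemma pvFoldAdd_eq_nub (zs : List String) (acc : List String) :
    zs.foldl PySem.Set.add acc = acc ++ pvNub (zs.filter (fun x => x ∉ acc)) := by
  induction zs generalizing acc with
  | nil => simp [pvNub]
  | cons z zs ih =>
    by_cases hm : z ∈ acc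
    · have : PySem.Set.add acc z = acc := by simp [PySem.Set.add, hm]
      simp only [List.foldl_cons, this, List.filter_cons]
      simp [hm, ih]
    · have hadd : PySem.Set.add acc z = acc ++ [z] := by simp [PySem.Set.add, hm]
      simp only [List.foldl_cons, hadd, List.filter_cons]
      simp only [hm, decide_not, decide_false, Bool.not_false, if_true]
      rw [ih]
      have hf : zs.filter (fun x => decide (x ∉ acc ++ [z]))
          = (zs.filter (fun x => decide (x ∉ acc))).filter (fun x => decide (x ≠ z)) := by
        rw [List.filter_filter]
        apply List.filter_congr
        intro x _
        by_cases h1 : x ∈ acc <;> by_cases h2 : x = z <;> simp [h1, h2, hm]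
      rw [hf, pvNub]
      simp
theorem collect_share_ids_from_form_py_spec_aux (form : List (String × String)) :
    collect_share_ids_from_form_py form = collect_share_ids_from_form_py_alt form := by
  simp only [collect_share_ids_from_form_py, collect_share_ids_from_form_py_alt]
  by_cases h : PySem.Str.strip ((form.lookup "share_ids_csv").getD "") = ""
  · -- all-whitespace CSV: the guard skips in A; B's single piece "" is filtered out
    have hp : (PySem.Str.split? "" ",") = some [""] := by decide
    have hs0 : PySem.Str.strip "" = "" := by decide
    simp only [h, hp, ne_eq, not_true_eq_false, if_false]
    simp only [Option.getD_some, List.singleton_append, List.map_cons, List.map_nil, hs0,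
      List.filter_cons, decide_not]
    by_cases hs : PySem.Str.strip ((form.lookup "share_id").getD "") = ""
    · simp [hs, pvNub]
    · simp [hs, pvNub]
  · simp only [ne_eq, h, not_false_eq_true, if_true]
    -- both sides over the same pieces list followed by the single id
    show pvStep (_root_.List.foldl (fun acc raw => pvStep acc (PySem.Str.strip raw)) [] _) _ = _
    have h1 : ∀ (pieces : List String) (sraw : String),
        pvStep (pieces.foldl (fun acc raw => pvStep acc (PySem.Str.strip raw)) [])
          (PySem.Str.strip sraw)
        = ((pieces ++ [sraw]).map PySem.Str.strip).foldl pvStep [] := by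
      intro pieces sraw
      simp [List.foldl_map, List.foldl_append]
    rw [h1, pvFoldStep_eq, pvFoldAdd_eq_nub]
    simp

-- ===== VERDICT =====
theorem collect_share_ids_from_form_py_spec : Claim_equal_collect_share_ids_from_form_py := by
  intro form _
  exact collect_share_ids_from_form_py_spec_aux form
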